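-- pv_equiv track=rewrite | github.com/TanDao01262000/polynot_vocabs_automate | supabase_database.py | _check_word_variations
-- ===== SOURCE A (Python) =====
-- def _check_word_variations(user_word: str, correct_word: str) -> bool:
--     """Check for common word variations (plurals, verb forms, etc.)"""
--     # Simple plural/singular variations
--     if user_word.endswith('s') and not correct_word.endswith('s'):
--         if user_word[:-1] == correct_word:
--             return True
--     elif correct_word.endswith('s') and not user_word.endswith('s'):
--         if correct_word[:-1] == user_word:
--             return True
--
--     # Common verb variations (simple cases)
--     verb_endings = ['ed', 'ing', 'er', 'est']
--     for ending in verb_endings: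
--         if user_word.endswith(ending) and not correct_word.endswith(ending):
--             if user_word[:-len(ending)] == correct_word:
--                 return True
--         elif correct_word.endswith(ending) and not user_word.endswith(ending):
--             if correct_word[:-len(ending)] == user_word:
--                 return True
--
--     return False
-- ===== SOURCE B (Python) =====
-- _VARIATION_SUFFIXES = ('s', 'ed', 'ing', 'er', 'est')
--
-- def _check_word_variations(user_word: str, correct_word: str) -> bool:
--     """Check for common word variations (plurals, verb forms, etc.)"""
--     if len(user_word) == len(correct_word):
--         return False
--     if len(user_word) < len(correct_word):
--         short, long_ = user_word, correct_word
--     else: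
--         short, long_ = correct_word, user_word
--     if not long_.startswith(short):
--         return False
--     suffix = long_[len(short):]
--     return suffix in _VARIATION_SUFFIXES and not short.endswith(suffix)
-- ===== Notes on version B (the rewrite author's own statement) =====
-- stated objective: simpler
-- what changed: Instead of A's nine endswith/slice/compare passes (the 's' block plus a loop over four verb endings, each tried in both directions), B compares lengths, checks that the longer word starts with the shorter, and does a single membership test on the one actual differing suffix, keeping the guard that the shorter word must not itself end with that suffix.
import Mathlib
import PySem

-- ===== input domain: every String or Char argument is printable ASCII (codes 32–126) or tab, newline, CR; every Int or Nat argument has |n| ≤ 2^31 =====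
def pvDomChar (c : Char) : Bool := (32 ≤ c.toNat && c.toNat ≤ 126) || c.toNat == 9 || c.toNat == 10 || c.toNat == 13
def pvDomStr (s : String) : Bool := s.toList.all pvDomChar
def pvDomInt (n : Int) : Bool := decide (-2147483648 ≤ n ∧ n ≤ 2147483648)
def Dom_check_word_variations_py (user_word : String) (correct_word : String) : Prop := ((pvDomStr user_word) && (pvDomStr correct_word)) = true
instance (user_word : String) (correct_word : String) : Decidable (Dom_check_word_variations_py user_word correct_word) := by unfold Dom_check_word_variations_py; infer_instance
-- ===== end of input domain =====

-- B replaces A's nine endswith/slice/compare passes by one length comparison plus a single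
-- membership test on the one suffix by which the longer word actually exceeds the shorter (objective: simpler).

-- ===== PORT A =====
-- the 'for ending in verb_endings' loop of A: return True on the first matching ending, else False
def check_word_variations_py_verbLoop (user_word : String) (correct_word : String) : Bool :=
  ["ed", "ing", "er", "est"].any (fun ending =>
    if PySem.Str.endswith user_word ending && !(PySem.Str.endswith correct_word ending) then
      PySem.Str.slice user_word none (some (-(PySem.Str.len ending))) == correct_word
    else if PySem.Str.endswith correct_word ending && !(PySem.Str.endswith user_word ending) then
      PySem.Str.slice correct_word none (some (-(PySem.Str.len ending))) == user_word
    else false)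

def check_word_variations_py (user_word : String) (correct_word : String) : Bool :=
  if PySem.Str.endswith user_word "s" && !(PySem.Str.endswith correct_word "s") then
    if PySem.Str.slice user_word none (some (-1)) == correct_word then true
    else check_word_variations_py_verbLoop user_word correct_word
  else if PySem.Str.endswith correct_word "s" && !(PySem.Str.endswith user_word "s") then
    if PySem.Str.slice correct_word none (some (-1)) == user_word then true
    else check_word_variations_py_verbLoop user_word correct_word
  else check_word_variations_py_verbLoop user_word correct_word

-- ===== PORT B =====
def check_word_variations_py_alt (user_word : String) (correct_word : String) : Bool :=
  if PySem.Str.len user_word == PySem.Str.len correct_word then false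
  else
    let short := if PySem.Str.len user_word < PySem.Str.len correct_word then user_word else correct_word
    let long_ := if PySem.Str.len user_word < PySem.Str.len correct_word then correct_word else user_word
    if !(PySem.Str.startswith long_ short) then false
    else
      let suffix := PySem.Str.slice long_ (some (PySem.Str.len short)) none
      (["s", "ed", "ing", "er", "est"].contains suffix) && !(PySem.Str.endswith short suffix)

-- ===== PRECONDITION & SPEC =====
def Spec_check_word_variations_py (user_word : String) (correct_word : String) (out : Bool) : Prop := out = check_word_variations_py_alt user_word correct_word
instance (user_word : String) (correct_word : String) (out : Bool) : Decidable (Spec_check_word_variations_py user_word correct_word out) := by unfold Spec_check_word_variations_py; infer_instance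

-- ===== CLAIM (what is proved, stated in full; the proofs are below) =====
def Claim_equal_check_word_variations_py : Prop := ∀ (user_word : String) (correct_word : String), Dom_check_word_variations_py user_word correct_word → Spec_check_word_variations_py user_word correct_word (check_word_variations_py user_word correct_word)

-- ===== LEMMAS AND PROOFS =====

-- the five candidate endings, as char lists
def pvEnds : List (List Char) := [['s'], ['e','d'], ['i','n','g'], ['e','r'], ['e','s','t']]

-- the common characterisation both ports are proved equivalent to:
-- one word is the other plus an ending e, and the shorter word does not itself end with e
def pvC (a b : List Char) : Prop :=
  ∃ e ∈ pvEnds, (a = b ++ e ∧ ¬ e <:+ b) ∨ (b = a ++ e ∧ ¬ e <:+ a)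

-- the part of pvC contributed by one fixed ending e
def pvD (e a b : List Char) : Prop := (a = b ++ e ∧ ¬ e <:+ b) ∨ (b = a ++ e ∧ ¬ e <:+ a)

lemma pvK (a b e : List Char) :
    (e <:+ a ∧ a.take (a.length - e.length) = b) ↔ a = b ++ e := by
  constructor
  · rintro ⟨⟨p, rfl⟩, h⟩
    simp at h
    subst h; rfl
  · rintro rfl
    exact ⟨⟨b, rfl⟩, by simp⟩

-- one iteration of A's per-ending test, characterised
lemma pvEndTest_iff (u c : String) (e : List Char) (es : String) (hes : es.toList = e)
    (bA bC : Bool)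
    (hA : bA = ((PySem.Str.slice u none (some (-(e.length : Int)))) == c))
    (hC : bC = ((PySem.Str.slice c none (some (-(e.length : Int)))) == u)) :
    (if PySem.Str.endswith u es && !(PySem.Str.endswith c es) then bA
     else if PySem.Str.endswith c es && !(PySem.Str.endswith u es) then bC
     else false) = true ↔
      ((u.toList = c.toList ++ e ∧ ¬ e <:+ c.toList) ∨
       (c.toList = u.toList ++ e ∧ ¬ e <:+ u.toList)) := by
  subst hes hA hC
  split_ifs with h1 h2
  · simp only [Bool.and_eq_true, Bool.not_eq_true', Bool.eq_false_iff, ne_eq,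
      PySem.Str.endswith_eq, PySem.Chars.endswith_iff] at h1
    obtain ⟨hu, hc⟩ := h1
    have hne : es.toList ≠ [] := fun h => hc (h ▸ List.nil_suffix)
    rw [beq_iff_eq, ← String.toList_inj, PySem.Str.toList_slice,
      PySem.Chars.slice_eq_listSlice,
      PySem.List.slice_to_neg_natCast _ _ (List.length_pos_iff.mpr hne)]
    constructor
    · intro h; exact Or.inl ⟨((pvK _ _ _).mp ⟨hu, h⟩), hc⟩
    · rintro (⟨h, _⟩ | ⟨h, hnu⟩)
      · exact ((pvK _ _ _).mpr h).2
      · exact absurd hu hnu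
  · simp only [Bool.and_eq_true, Bool.not_eq_true', Bool.eq_false_iff, ne_eq,
      PySem.Str.endswith_eq, PySem.Chars.endswith_iff] at h2
    obtain ⟨hc, hu⟩ := h2
    have hne : es.toList ≠ [] := fun h => hu (h ▸ List.nil_suffix)
    rw [beq_iff_eq, ← String.toList_inj, PySem.Str.toList_slice,
      PySem.Chars.slice_eq_listSlice,
      PySem.List.slice_to_neg_natCast _ _ (List.length_pos_iff.mpr hne)]
    constructor
    · intro h; exact Or.inr ⟨((pvK _ _ _).mp ⟨hc, h⟩), hu⟩
    · rintro (⟨h, hnc⟩ | ⟨h, _⟩)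
      · exact absurd hc hnc
      · exact ((pvK _ _ _).mpr h).2
  · simp only [Bool.and_eq_true, Bool.not_eq_true', Bool.eq_false_iff, ne_eq,
      PySem.Str.endswith_eq, PySem.Chars.endswith_iff, not_and, not_not] at h1 h2
    simp only [false_iff]
    rintro (⟨hEq, hnc⟩ | ⟨hEq, hnu⟩)
    · exact hnc (h1 (hEq ▸ List.suffix_append _ _))
    · exact hnu (h2 (hEq ▸ List.suffix_append _ _))

lemma pvLoop_iff (u c : String) :
    check_word_variations_py_verbLoop u c = true ↔
      (pvD ['e','d'] u.toList c.toList ∨ pvD ['i','n','g'] u.toList c.toList ∨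
       pvD ['e','r'] u.toList c.toList ∨ pvD ['e','s','t'] u.toList c.toList) := by
  have l2 : PySem.Str.len "ed" = ((['e','d'].length : Nat) : Int) := by decide
  have l3 : PySem.Str.len "ing" = ((['i','n','g'].length : Nat) : Int) := by decide
  have l2' : PySem.Str.len "er" = ((['e','r'].length : Nat) : Int) := by decide
  have l3' : PySem.Str.len "est" = ((['e','s','t'].length : Nat) : Int) := by decide
  unfold check_word_variations_py_verbLoop
  simp only [List.any_cons, List.any_nil, Bool.or_false, Bool.or_eq_true]
  rw [pvEndTest_iff u c ['e','d'] "ed" rfl _ _ (by rw [l2]) (by rw [l2]),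
      pvEndTest_iff u c ['i','n','g'] "ing" rfl _ _ (by rw [l3]) (by rw [l3]),
      pvEndTest_iff u c ['e','r'] "er" rfl _ _ (by rw [l2']) (by rw [l2']),
      pvEndTest_iff u c ['e','s','t'] "est" rfl _ _ (by rw [l3']) (by rw [l3'])]
  rfl

lemma pvA_iff (u c : String) :
    check_word_variations_py u c = true ↔ pvC u.toList c.toList := by
  have hs : check_word_variations_py u c =
      ((if PySem.Str.endswith u "s" && !(PySem.Str.endswith c "s") then
          (PySem.Str.slice u none (some (-1)) == c)
        else if PySem.Str.endswith c "s" && !(PySem.Str.endswith u "s") then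
          (PySem.Str.slice c none (some (-1)) == u)
        else false) || check_word_variations_py_verbLoop u c) := by
    unfold check_word_variations_py
    cases h1 : (PySem.Str.endswith u "s" && !PySem.Str.endswith c "s") <;>
      cases h2 : (PySem.Str.endswith c "s" && !PySem.Str.endswith u "s") <;>
        cases hi : (PySem.Str.slice u none (some (-1)) == c) <;>
          cases hj : (PySem.Str.slice c none (some (-1)) == u) <;>
            simp [h1, h2, hi, hj]
  rw [hs, Bool.or_eq_true,
    pvEndTest_iff u c ['s'] "s" rfl _ _ (by norm_num) (by norm_num), pvLoop_iff]
  simp only [pvD, pvC, pvEnds]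
  constructor
  · rintro (h | h | h | h | h)
    exacts [⟨['s'], by simp, h⟩, ⟨['e','d'], by simp, h⟩, ⟨['i','n','g'], by simp, h⟩,
      ⟨['e','r'], by simp, h⟩, ⟨['e','s','t'], by simp, h⟩]
  · rintro ⟨e, he, h⟩
    simp only [List.mem_cons, List.not_mem_nil, or_false] at he
    rcases he with rfl | rfl | rfl | rfl | rfl
    exacts [Or.inl h, Or.inr (Or.inl h), Or.inr (Or.inr (Or.inl h)),
      Or.inr (Or.inr (Or.inr (Or.inl h))), Or.inr (Or.inr (Or.inr (Or.inr h)))]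

lemma pvEnds_ne_nil {e : List Char} (he : e ∈ pvEnds) : e ≠ [] := by
  simp only [pvEnds, List.mem_cons, List.not_mem_nil, or_false] at he
  rcases he with rfl | rfl | rfl | rfl | rfl <;> simp

lemma pvMemEnds (s : String) :
    (["s", "ed", "ing", "er", "est"].contains s) = true ↔ s.toList ∈ pvEnds := by
  rw [List.contains_iff_mem]
  constructor
  · rintro h
    simp only [List.mem_cons, List.not_mem_nil, or_false] at h
    rcases h with rfl | rfl | rfl | rfl | rfl <;> decide
  · intro h
    simp only [pvEnds, List.mem_cons, List.not_mem_nil, or_false] at h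
    have hs : s = "s" ∨ s = "ed" ∨ s = "ing" ∨ s = "er" ∨ s = "est" := by
      rcases h with h | h | h | h | h
      exacts [Or.inl (String.toList_inj.mp (by rw [h]; decide)),
        Or.inr (Or.inl (String.toList_inj.mp (by rw [h]; decide))),
        Or.inr (Or.inr (Or.inl (String.toList_inj.mp (by rw [h]; decide)))),
        Or.inr (Or.inr (Or.inr (Or.inl (String.toList_inj.mp (by rw [h]; decide))))),
        Or.inr (Or.inr (Or.inr (Or.inr (String.toList_inj.mp (by rw [h]; decide)))))]
    rcases hs with rfl | rfl | rfl | rfl | rfl <;> simp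

-- the branch B takes once 'short' and 'long_' are fixed
lemma pvB_oriented (s l : String) :
    ((if !(PySem.Str.startswith l s) then false
      else
        (["s", "ed", "ing", "er", "est"].contains (PySem.Str.slice l (some (PySem.Str.len s)) none)) &&
          !(PySem.Str.endswith s (PySem.Str.slice l (some (PySem.Str.len s)) none))) = true) ↔
      ∃ e ∈ pvEnds, l.toList = s.toList ++ e ∧ ¬ e <:+ s.toList := by
  have hsl : (PySem.Str.slice l (some (PySem.Str.len s)) none).toList
      = l.toList.drop s.toList.length := by
    rw [PySem.Str.toList_slice, PySem.Chars.slice_eq_listSlice, PySem.Str.len_eq,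
      PySem.List.slice_from_natCast]
  by_cases hp : (PySem.Str.startswith l s) = true
  · have hp' : s.toList <+: l.toList := by
      rw [PySem.Str.startswith_eq, PySem.Chars.startswith_iff] at hp; exact hp
    have hl : l.toList = s.toList ++ l.toList.drop s.toList.length :=
      (List.prefix_iff_eq_append.mp hp').symm
    rw [if_neg (by rw [hp]; simp), Bool.and_eq_true, pvMemEnds, hsl,
      Bool.not_eq_true', Bool.eq_false_iff, ne_eq, PySem.Str.endswith_eq,
      PySem.Chars.endswith_iff, hsl]
    constructor
    · rintro ⟨h1, h2⟩
      exact ⟨_, h1, hl, h2⟩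
    · rintro ⟨e, he, hEq, hn⟩
      have hd : l.toList.drop s.toList.length = e := by rw [hEq, List.drop_left]
      rw [hd]; exact ⟨he, hn⟩
  · rw [if_pos (by rw [Bool.eq_false_iff.mpr hp]; rfl)]
    simp only [Bool.false_eq_true, false_iff]
    rintro ⟨e, he, hEq, _⟩
    exact hp (by
      rw [PySem.Str.startswith_eq, PySem.Chars.startswith_iff, hEq]
      exact List.prefix_append _ _)

lemma pvC_len {a b : List Char} (h : pvC a b) : a.length ≠ b.length := by
  obtain ⟨e, he, h | h⟩ := h
  · have hne := pvEnds_ne_nil he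
    have := List.length_pos_iff.mpr hne
    simp [h.1]; omega
  · have hne := pvEnds_ne_nil he
    have := List.length_pos_iff.mpr hne
    simp [h.1]; omega

lemma pvB_iff (u c : String) :
    check_word_variations_py_alt u c = true ↔ pvC u.toList c.toList := by
  unfold check_word_variations_py_alt
  rcases lt_trichotomy u.toList.length c.toList.length with hlt | heq | hgt
  · have c1 : (PySem.Str.len u == PySem.Str.len c) = false := by
      rw [PySem.Str.len_eq, PySem.Str.len_eq]
      simp only [beq_eq_false_iff_ne, ne_eq, Nat.cast_inj]
      omega
    have c2 : PySem.Str.len u < PySem.Str.len c := by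
      rw [PySem.Str.len_eq, PySem.Str.len_eq]; exact_mod_cast hlt
    rw [if_neg (by rw [c1]; simp), if_pos c2, if_pos c2, pvB_oriented u c]
    simp only [pvC]
    constructor
    · rintro ⟨e, he, hEq, hn⟩; exact ⟨e, he, Or.inr ⟨hEq, hn⟩⟩
    · rintro ⟨e, he, ⟨hEq, _⟩ | h⟩
      · have := List.length_pos_iff.mpr (pvEnds_ne_nil he)
        have h2 := congrArg List.length hEq
        rw [List.length_append] at h2
        omega
      · exact ⟨e, he, h⟩
  · rw [if_pos (by rw [PySem.Str.len_eq, PySem.Str.len_eq, heq]; exact beq_self_eq_true _)]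
    simp only [Bool.false_eq_true, false_iff]
    exact fun h => pvC_len h heq
  · have c1 : (PySem.Str.len u == PySem.Str.len c) = false := by
      rw [PySem.Str.len_eq, PySem.Str.len_eq]
      simp only [beq_eq_false_iff_ne, ne_eq, Nat.cast_inj]
      omega
    have c2 : ¬ (PySem.Str.len u < PySem.Str.len c) := by
      rw [PySem.Str.len_eq, PySem.Str.len_eq]
      intro h; rw [Nat.cast_lt] at h; omega
    rw [if_neg (by rw [c1]; simp), if_neg c2, if_neg c2, pvB_oriented c u]
    simp only [pvC]
    constructor
    · rintro ⟨e, he, hEq, hn⟩; exact ⟨e, he, Or.inl ⟨hEq, hn⟩⟩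
    · rintro ⟨e, he, h | ⟨hEq, _⟩⟩
      · exact ⟨e, he, h⟩
      · have := List.length_pos_iff.mpr (pvEnds_ne_nil he)
        have h2 := congrArg List.length hEq
        rw [List.length_append] at h2
        omega

-- ===== VERDICT (by name: the statement is the Claim_ definition above) =====
theorem check_word_variations_py_spec : Claim_equal_check_word_variations_py := by
  intro u c _
  show check_word_variations_py u c = check_word_variations_py_alt u c
  rw [Bool.eq_iff_iff, pvA_iff, pvB_iff]
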